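-- pv_equiv track=rewrite | github.com/tum-lkn/mistill | dataprep/link_failures.py | _reduce_pairs_flat
-- ===== SOURCE A (Python) =====
-- from typing import Any, Dict, List, Tuple
--
-- def _reduce_pairs_flat(pairs: List[List[Tuple[Tuple[Any, Any], Tuple[Any, Any]]]]) -> Dict[Tuple[Any, Any], List[Tuple[Any, Any]]]:
--     """
--     @Note Deprecated by _reduce_pairs_by_type. Might be useful for non-fat-tree
--     topologies, though. THats why I keep it.
--
--     Reduce the pairs obtained from the split_path function to a dictionary that
--     maps edges to the source and destination pairs whose shortest paths run
--     over that edge.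
--
--     Args:
--         pairs:
--
--     Returns:
--
--     """
--     ret = {}
--     for part in pairs:
--         for e, pair in part:
--             if e not in ret:
--                 ret[e] = []
--             if pair in ret[e]:
--                 continue
--             else:
--                 ret[e].append(pair)
--     return ret
-- ===== SOURCE B (Python) =====
-- from typing import Any, Dict, List, Tuple
--
-- def _reduce_pairs_flat(pairs: List[List[Tuple[Tuple[Any, Any], Tuple[Any, Any]]]]) -> Dict[Tuple[Any, Any], List[Tuple[Any, Any]]]:
--     # Edge-major recomputation: flatten once, list the distinct edges in first-occurrence
--     # order, then build each edge's pair list by filtering the flat stream and deduplicating.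
--     flat = [item for part in pairs for item in part]
--     edges = list(dict.fromkeys(e for e, _ in flat))
--     return {e: list(dict.fromkeys(p for ee, p in flat if ee == e)) for e in edges}
-- ===== Notes on version B (the rewrite author's own statement) =====
-- stated objective: alternative
-- what changed: Replaces A's single streaming loop that groups pairs under their edge while deduplicating via a membership test on the growing list by an edge-major recomputation: flatten the parts once, compute the distinct edges in first-occurrence order, and build each edge's value as the order-preserving dedup of the pairs obtained by filtering the flat stream for that edge.
import Mathlib
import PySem

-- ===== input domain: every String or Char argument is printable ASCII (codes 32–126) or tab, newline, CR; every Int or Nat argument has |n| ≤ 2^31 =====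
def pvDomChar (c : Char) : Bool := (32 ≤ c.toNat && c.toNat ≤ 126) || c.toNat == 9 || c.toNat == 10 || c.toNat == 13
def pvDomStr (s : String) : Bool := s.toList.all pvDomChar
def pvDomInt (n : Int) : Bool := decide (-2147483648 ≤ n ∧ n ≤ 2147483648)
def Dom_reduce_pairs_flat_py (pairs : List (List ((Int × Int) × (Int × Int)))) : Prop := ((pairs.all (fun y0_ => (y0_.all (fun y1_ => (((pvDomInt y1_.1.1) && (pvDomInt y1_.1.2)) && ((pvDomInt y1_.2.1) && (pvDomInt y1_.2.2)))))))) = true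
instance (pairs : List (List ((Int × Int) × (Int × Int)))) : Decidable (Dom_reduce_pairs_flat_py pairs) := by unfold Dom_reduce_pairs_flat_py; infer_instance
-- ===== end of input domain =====

-- B replaces A's single streaming group-and-dedup loop by an edge-major recomputation:
-- flatten once, list the distinct edges, and build each edge's deduped pair list by
-- filtering the flat stream (alternative decomposition; same result).

-- ===== PORT A =====
-- one iteration of A's inner loop body: init missing key to [], skip if pair already grouped, else append
def pvStepA (ret : PySem.Dict (Int × Int) (List (Int × Int))) (ep : (Int × Int) × (Int × Int)) :
    PySem.Dict (Int × Int) (List (Int × Int)) :=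
  let ret1 := if ret.contains ep.1 then ret else ret.insert ep.1 []
  let cur := ret1.getD ep.1 []
  if ep.2 ∈ cur then ret1 else ret1.insert ep.1 (cur ++ [ep.2])

def reduce_pairs_flat_py (pairs : List (List ((Int × Int) × (Int × Int)))) : List (Int × Int × List (Int × Int)) :=
  ((pairs.foldl (fun ret part => part.foldl pvStepA ret) PySem.Dict.empty).items).map
    (fun kv => (kv.1.1, kv.1.2, kv.2))

-- ===== PORT B =====
def reduce_pairs_flat_py_alt (pairs : List (List ((Int × Int) × (Int × Int)))) : List (Int × Int × List (Int × Int)) :=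
  -- flat = [item for part in pairs for item in part]
  let flat := pairs.flatMap (fun part => part)
  -- edges = list(dict.fromkeys(e for e, _ in flat))
  let edges := PySem.List.dedup (flat.map (fun it => it.1))
  -- {e: list(dict.fromkeys(p for ee, p in flat if ee == e)) for e in edges} — keys distinct, in edges order
  edges.map (fun e => (e.1, e.2, PySem.List.dedup ((flat.filter (fun it => it.1 == e)).map (fun it => it.2))))

-- ===== PRECONDITION & SPEC =====
def Spec_reduce_pairs_flat_py (pairs : List (List ((Int × Int) × (Int × Int)))) (out : List (Int × Int × List (Int × Int))) : Prop := out = reduce_pairs_flat_py_alt pairs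
instance (pairs : List (List ((Int × Int) × (Int × Int)))) (out : List (Int × Int × List (Int × Int))) : Decidable (Spec_reduce_pairs_flat_py pairs out) := by unfold Spec_reduce_pairs_flat_py; infer_instance

-- ===== CLAIM (what is proved, stated in full; the proofs are below) =====
def Claim_equal_reduce_pairs_flat_py : Prop := ∀ (pairs : List (List ((Int × Int) × (Int × Int)))), Dom_reduce_pairs_flat_py pairs → Spec_reduce_pairs_flat_py pairs (reduce_pairs_flat_py pairs)

-- ===== LEMMAS AND PROOFS =====

-- the plain setdefault-append grouping step ret[e] = ret.get(e, []) + [pair], used only by the proof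
def pvStepG (ret : PySem.Dict (Int × Int) (List (Int × Int))) (ep : (Int × Int) × (Int × Int)) :
    PySem.Dict (Int × Int) (List (Int × Int)) :=
  ret.modify ep.1 [] (· ++ [ep.2])

-- dedup every value of a dict, keys and order untouched
def pvMapVal (d : PySem.Dict (Int × Int) (List (Int × Int))) : PySem.Dict (Int × Int) (List (Int × Int)) :=
  PySem.Dict.mk (d.items.map (fun kv => (kv.1, PySem.List.dedup kv.2)))

lemma pvMapVal_contains (d : PySem.Dict (Int × Int) (List (Int × Int))) (k : Int × Int) :
    (pvMapVal d).contains k = d.contains k := by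
  simp [pvMapVal, PySem.Dict.contains, List.any_map, Function.comp_def]

lemma pvMapVal_get? (d : PySem.Dict (Int × Int) (List (Int × Int))) (k : Int × Int) :
    (pvMapVal d).get? k = (d.get? k).map PySem.List.dedup := by
  simp [pvMapVal, PySem.Dict.get?, List.find?_map, Function.comp_def]

lemma pvMapVal_keys (d : PySem.Dict (Int × Int) (List (Int × Int))) :
    (pvMapVal d).keys = d.keys := by
  simp [pvMapVal, PySem.Dict.keys, List.map_map, Function.comp_def]

lemma pvMapVal_insert (d : PySem.Dict (Int × Int) (List (Int × Int))) (k : Int × Int) (v : List (Int × Int)) :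
    pvMapVal (d.insert k v) = (pvMapVal d).insert k (PySem.List.dedup v) := by
  simp only [PySem.Dict.insert, pvMapVal_contains]
  cases hc : d.contains k with
  | false => simp [pvMapVal]
  | true =>
      simp only [pvMapVal, if_true]
      congr 1
      simp only [List.map_map]
      apply List.map_congr_left
      intro q _
      by_cases h : q.1 = k <;> simp [h]

lemma pvDedup_append_singleton (v : List (Int × Int)) (p : Int × Int) :
    PySem.List.dedup (v ++ [p]) =
      if p ∈ v then PySem.List.dedup v else PySem.List.dedup v ++ [p] := by
  have h1 : PySem.List.dedup (v ++ [p]) = PySem.Set.add (PySem.List.dedup v) p := by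
    simp only [PySem.List.dedup, PySem.Set.ofList_eq_foldl, List.foldl_append, List.foldl_cons,
      List.foldl_nil]
  rw [h1, PySem.Set.add]
  by_cases h : p ∈ v <;>
    simp [h, PySem.Set.contains_eq_listContains, List.contains_eq_mem]

-- inserting at an existing key the very value stored there is a no-op (keys unique)
lemma pvInsert_self_noop (d : PySem.Dict (Int × Int) (List (Int × Int))) (k : Int × Int)
    (v : List (Int × Int)) (hnd : d.keys.Nodup) (h : d.get? k = some v) :
    d.insert k v = d := by
  have hc : d.contains k = true := by
    rw [PySem.Dict.contains_eq_isSome_get?, h]; rfl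
  simp only [PySem.Dict.insert, hc, if_true]
  apply PySem.Dict.ext
  show _ = d.items
  have : ∀ p ∈ d.items, (if p.1 == k then (k, v) else p) = p := by
    intro p hp
    by_cases hk : p.1 = k
    · have hp' : (p.1, p.2) ∈ d.items := by simpa using hp
      have : d.get? p.1 = some p.2 := PySem.Dict.get?_of_mem_items d hp' hnd
      rw [hk, h] at this
      have hv : v = p.2 := Option.some_inj.mp this
      simp [hv, ← hk]
    · simp [hk]
  rw [List.map_congr_left this]; simp

lemma pvStepG_nodup (d : PySem.Dict (Int × Int) (List (Int × Int))) (ep : (Int × Int) × (Int × Int))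
    (hnd : d.keys.Nodup) : (pvStepG d ep).keys.Nodup := by
  simp only [pvStepG, PySem.Dict.modify]
  exact PySem.Dict.nodup_keys_insert _ _ _ hnd

-- the heart of the equivalence: one A-step on the dedup-collapsed dict = collapse after one grouping step
lemma pvStep_comm (d : PySem.Dict (Int × Int) (List (Int × Int))) (ep : (Int × Int) × (Int × Int))
    (hnd : d.keys.Nodup) :
    pvStepA (pvMapVal d) ep = pvMapVal (pvStepG d ep) := by
  obtain ⟨e, p⟩ := ep
  simp only [pvStepA, pvStepG, PySem.Dict.modify, pvMapVal_insert, pvMapVal_contains]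
  cases hc : d.contains e with
  | false =>
      have hg : d.getD e [] = [] :=
        PySem.Dict.getD_of_not_contains (d := d) (k := e) (d0 := ([] : List (Int × Int))) hc
      simp only [Bool.false_eq_true, if_false, hg, List.nil_append]
      rw [PySem.Dict.getD_insert_self]
      rw [if_neg (List.not_mem_nil)]
      rw [PySem.Dict.insert_insert_self]
      rfl
  | true =>
      simp only [if_true]
      have hv : d.get? e = some (d.getD e []) := by
        rw [PySem.Dict.contains_eq_isSome_get?] at hc
        cases hg : d.get? e with
        | none => rw [hg] at hc; simp at hc
        | some w => simp [PySem.Dict.getD_eq_get?_getD, hg]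
      have hg2 : (pvMapVal d).getD e [] = PySem.List.dedup (d.getD e []) := by
        rw [PySem.Dict.getD_eq_get?_getD, pvMapVal_get?, hv]; rfl
      rw [hg2, pvDedup_append_singleton]
      by_cases hp : p ∈ d.getD e []
      · rw [if_pos (by rw [PySem.List.mem_dedup]; exact hp), if_pos hp]
        exact (pvInsert_self_noop (pvMapVal d) e _ (by rw [pvMapVal_keys]; exact hnd)
          (by rw [pvMapVal_get?, hv]; rfl)).symm
      · rw [if_neg (by rw [PySem.List.mem_dedup]; exact hp), if_neg hp]

lemma pvFold (l : List ((Int × Int) × (Int × Int))) (d : PySem.Dict (Int × Int) (List (Int × Int)))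
    (hnd : d.keys.Nodup) :
    l.foldl pvStepA (pvMapVal d) = pvMapVal (l.foldl pvStepG d) ∧ (l.foldl pvStepG d).keys.Nodup := by
  induction l generalizing d with
  | nil => exact ⟨rfl, hnd⟩
  | cons ep tl ih =>
      simp only [List.foldl_cons, pvStep_comm d ep hnd]
      exact ih (pvStepG d ep) (pvStepG_nodup d ep hnd)

-- ===== VERDICT (by name: the statement is the Claim_ definition above) =====
theorem reduce_pairs_flat_py_spec : Claim_equal_reduce_pairs_flat_py := by
  intro pairs _
  show _ = _
  unfold reduce_pairs_flat_py reduce_pairs_flat_py_alt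
  -- A's nested loop is the loop over the flattened stream
  have hflat : pairs.flatMap (fun part => part) = pairs.flatten := by
    simp [List.flatMap_def]
  rw [hflat]
  have hnest : pairs.foldl (fun ret part => part.foldl pvStepA ret) PySem.Dict.empty
      = pairs.flatten.foldl pvStepA PySem.Dict.empty := List.foldl_flatten.symm
  rw [hnest]
  -- A's fold = dedup-collapse of the plain setdefault-append grouping fold G
  have hnd0 : (PySem.Dict.empty : PySem.Dict (Int × Int) (List (Int × Int))).keys.Nodup := by
    simp [PySem.Dict.keys, PySem.Dict.empty]
  have h0 : pvMapVal PySem.Dict.empty = PySem.Dict.empty := rfl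
  have hAB := pvFold pairs.flatten PySem.Dict.empty hnd0
  rw [h0] at hAB
  set G := pairs.flatten.foldl pvStepG PySem.Dict.empty with hG
  rw [hAB.1]
  -- characterize G: keys and values of the grouping fold
  have hkeys : G.keys = PySem.List.dedup (pairs.flatten.map (fun it => it.1)) := by
    rw [hG]
    rw [show pvStepG = (fun d (p : (Int × Int) × (Int × Int)) => PySem.Dict.modify d p.1 [] (fun v => v ++ [p.2])) from rfl]
    rw [PySem.Dict.keys_foldl_modify_key pairs.flatten (fun p => p.1) [] (fun _ p v => v ++ [p.2]) PySem.Dict.empty]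
    simp [PySem.Dict.keys, PySem.Dict.empty, PySem.Set.update_nil_left]
  have hget : ∀ e, G.getD e [] = (pairs.flatten.filter (fun it => it.1 == e)).map (fun it => it.2) := by
    intro e
    rw [hG]
    rw [show pvStepG = (fun d (p : (Int × Int) × (Int × Int)) => PySem.Dict.modify d p.1 [] (fun v => v ++ [p.2])) from rfl]
    rw [PySem.Dict.getD_foldl_modify_append pairs.flatten PySem.Dict.empty e]
    simp [PySem.Dict.getD_empty]
  have hndG : G.keys.Nodup := hAB.2
  have hitems : G.items = G.keys.map (fun k => (k, G.getD k [])) :=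
    PySem.Dict.items_eq_map_keys G hndG []
  -- items of the collapsed dict, then the final reassociation map
  show (pvMapVal G).items.map _ = _
  have hmv : (pvMapVal G).items = G.items.map (fun kv => (kv.1, PySem.List.dedup kv.2)) := rfl
  rw [hmv, hitems, hkeys]
  simp only [List.map_map, Function.comp_def]
  apply List.map_congr_left
  intro e _
  simp [hget e]
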